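-- pv_equiv track=rewrite | github.com/yusufsamur/QueensSolver | gui.py | count_line
-- ===== SOURCE A (Python) =====
-- def count_line(line, threshold):
--     """Count continuous segments in a line"""
--     count = 0
--     run_length = 0
--
--     for pixel in line:
--         if pixel > 128:  # White pixel (cell area)
--             run_length += 1
--         else:  # Black pixel (grid line)
--             if run_length >= threshold:
--                 count += 1
--             run_length = 0
--
--     if run_length >= threshold:  # Last segment
--         count += 1
--
--     return count
-- ===== SOURCE B (Python) =====
-- def count_line(line, threshold):
--     """Count maximal runs of bright pixels (>128) whose length is >= threshold."""
--     count = 0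
--     i = 0
--     n = len(line)
--     while i < n:
--         if line[i] > 128:
--             j = i + 1
--             while j < n and line[j] > 128:
--                 j += 1
--             if j - i >= threshold:
--                 count += 1
--             i = j
--         else:
--             i += 1
--     return count
-- ===== Notes on version B (the rewrite author's own statement) =====
-- stated objective: alternative
-- what changed: B scans each maximal bright run as a whole with a two-pointer inner loop and counts qualifying runs, instead of A's single pass carrying a running run-length accumulator with a separate trailing-segment check.
-- intended difference: For threshold <= 0, A also counts a zero-length 'segment' at every dark pixel and at the end of the line (returning #dark pixels + 1), while B returns the number of maximal bright runs, which is the intended segment count. — e.g. on count_line([], 0): A returns 1, B returns 0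
import Mathlib
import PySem

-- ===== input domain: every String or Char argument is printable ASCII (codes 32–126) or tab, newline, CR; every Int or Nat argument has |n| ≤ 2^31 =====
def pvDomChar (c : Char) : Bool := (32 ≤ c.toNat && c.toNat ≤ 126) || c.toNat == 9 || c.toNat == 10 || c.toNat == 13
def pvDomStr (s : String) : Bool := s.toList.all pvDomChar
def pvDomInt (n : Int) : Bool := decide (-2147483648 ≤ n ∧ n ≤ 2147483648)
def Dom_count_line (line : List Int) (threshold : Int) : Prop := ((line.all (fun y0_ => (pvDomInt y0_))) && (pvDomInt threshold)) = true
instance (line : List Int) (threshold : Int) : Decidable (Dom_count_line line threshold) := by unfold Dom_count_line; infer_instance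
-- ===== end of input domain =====

-- B replaces A's running run-length accumulator by a two-pointer scan over whole
-- bright runs; for threshold <= 0, B returns the intended run count where A also
-- counts zero-length runs at dark pixels (alternative decomposition, same cost).


-- ===== PORT A =====
-- literal transliteration: fold carrying (count, run_length), then trailing check
def count_line (line : List Int) (threshold : Int) : Int :=
  let s := line.foldl
    (fun (st : Int × Int) pixel =>
      if pixel > 128 then (st.1, st.2 + 1)
      else (if st.2 ≥ threshold then st.1 + 1 else st.1, 0))
    (0, 0)
  if s.2 ≥ threshold then s.1 + 1 else s.1

-- ===== PORT B =====
-- Source B's inner while loop scanning the bright run [i, j) is ported exactly as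
-- takeWhile/dropWhile on the suffix; the outer while loop is the recursion.
def countLineAltGo (l : List Int) (threshold : Int) : Int :=
  match l with
  | [] => 0
  | p :: rest =>
    if p > 128 then
      (if (1 + ((rest.takeWhile (fun q => q > 128)).length : Int)) ≥ threshold then 1 else 0)
        + countLineAltGo (rest.dropWhile (fun q => q > 128)) threshold
    else countLineAltGo rest threshold
termination_by l.length
decreasing_by
  · have := List.length_dropWhile_le (fun q : Int => q > 128) rest
    simpa using Nat.lt_succ_of_le this
  · simp

def count_line_alt (line : List Int) (threshold : Int) : Int :=
  countLineAltGo line threshold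

-- ===== PRECONDITION & SPEC =====
-- For threshold ≤ 0, A counts a zero-length 'segment' at every dark pixel and at the
-- end of the line (returning #dark pixels + 1); B returns the number of maximal
-- bright runs, the intended segment count.
def D_count_line (line : List Int) (threshold : Int) : Prop := threshold ≤ 0
instance (line : List Int) (threshold : Int) : Decidable (D_count_line line threshold) := by unfold D_count_line; infer_instance

def Spec_count_line (line : List Int) (threshold : Int) (out : Int) : Prop := ¬ D_count_line line threshold → out = count_line_alt line threshold
instance (line : List Int) (threshold : Int) (out : Int) : Decidable (Spec_count_line line threshold out) := by unfold Spec_count_line; infer_instance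

def pvDiffWitness_count_line : List Int × Int := ([], 0)
def pvDiffWitnessOut_count_line : Int × Int := (1, 0)

-- ===== CLAIM (what is proved, stated in full; the proofs are below) =====
def Claim_unchanged_count_line : Prop := ∀ (line : List Int) (threshold : Int), Dom_count_line line threshold → Spec_count_line line threshold (count_line line threshold)
def Claim_changed_count_line : Prop := Dom_count_line (pvDiffWitness_count_line.1) (pvDiffWitness_count_line.2) ∧ D_count_line (pvDiffWitness_count_line.1) (pvDiffWitness_count_line.2) ∧ count_line (pvDiffWitness_count_line.1) (pvDiffWitness_count_line.2) = pvDiffWitnessOut_count_line.1 ∧ count_line_alt (pvDiffWitness_count_line.1) (pvDiffWitness_count_line.2) = pvDiffWitnessOut_count_line.2 ∧ pvDiffWitnessOut_count_line.1 ≠ pvDiffWitnessOut_count_line.2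

-- ===== LEMMAS AND PROOFS =====

-- closing a run at a boundary: counting the leading bright run of `rest` and
-- recursing on its remainder is exactly countLineAltGo on `rest` (needs 1 ≤ t).
theorem countLineAltGo_split (rest : List Int) (t : Int) (ht : 1 ≤ t) :
    (if (((rest.takeWhile (fun q => q > 128)).length : Int)) ≥ t then 1 else 0)
      + countLineAltGo (rest.dropWhile (fun q => q > 128)) t
    = countLineAltGo rest t := by
  match rest with
  | [] =>
    simp [countLineAltGo]
    omega
  | q :: rest' =>
    by_cases hq : q > 128
    · simp [countLineAltGo, List.takeWhile, List.dropWhile, hq]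
      ring_nf
    · simp [countLineAltGo, List.takeWhile, List.dropWhile, hq]
      omega

theorem count_line_invariant (line : List Int) (t : Int) (ht : 1 ≤ t) :
    ∀ (c r : Int),
      (let s := line.foldl
        (fun (st : Int × Int) pixel =>
          if pixel > 128 then (st.1, st.2 + 1)
          else (if st.2 ≥ t then st.1 + 1 else st.1, 0)) (c, r)
       if s.2 ≥ t then s.1 + 1 else s.1)
      = c + (if (r + ((line.takeWhile (fun q => q > 128)).length : Int)) ≥ t then 1 else 0)
          + countLineAltGo (line.dropWhile (fun q => q > 128)) t := by
  induction line with
  | nil =>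
    intro c r
    simp [countLineAltGo]
    omega
  | cons p rest ih =>
    intro c r
    by_cases hp : p > 128
    · have := ih c (r + 1)
      simp only [List.foldl, hp, List.takeWhile, List.dropWhile] at *
      simp at *
      rw [this]
      ring_nf
    · have hthis := ih (c + if t ≤ r then 1 else 0) 0
      have hsplit := countLineAltGo_split rest t ht
      simp only [List.foldl, List.takeWhile, List.dropWhile] at *
      simp [hp, countLineAltGo] at *
      by_cases hr : t ≤ r <;> simp [hr] at hthis ⊢ <;> linarith [hsplit, hthis]

-- ===== VERDICT (by name: the statement is the Claim_ definition above) =====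
theorem count_line_spec : Claim_unchanged_count_line := by
  intro line t _ hD
  unfold D_count_line at hD
  have ht : 1 ≤ t := by omega
  unfold count_line count_line_alt
  have := count_line_invariant line t ht 0 0
  simp only at this
  rw [this]
  have := countLineAltGo_split line t ht
  simpa using this

theorem count_line_changed : Claim_changed_count_line := by
  unfold Claim_changed_count_line
  refine ⟨by decide, by decide, by decide, ?_, by decide⟩
  show count_line_alt [] 0 = 0
  simp [count_line_alt, countLineAltGo]
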